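-- pv_equiv track=rewrite | github.com/ansh348/Legal-Knowledge-Graphs | eval_concept_retrieval.py | build_full_case_text
-- ===== SOURCE A (Python) =====
-- def build_full_case_text(graph):
--     """FIX: Use ALL available text from the graph - facts, arguments, holdings, issues.
--
--     This gives TF-IDF a much richer signal to work with compared to just concept metadata.
--     """
--     parts = []
--
--     # Facts - the primary content
--     for f in (graph.get("facts") or []):
--         if isinstance(f, dict):
--             t = f.get("text")
--             if isinstance(t, str) and t.strip():
--                 parts.append(t.strip())
--
--     # Issues - what the court is deciding
--     for iss in (graph.get("issues") or []):
--         if isinstance(iss, dict):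
--             t = iss.get("text")
--             if isinstance(t, str) and t.strip():
--                 parts.append(t.strip())
--
--     # Arguments - claims made by parties
--     for a in (graph.get("arguments") or []):
--         if isinstance(a, dict):
--             t = a.get("claim")
--             if isinstance(t, str) and t.strip():
--                 parts.append(t.strip())
--             # Also include court reasoning if present
--             cr = a.get("court_reasoning")
--             if isinstance(cr, str) and cr.strip():
--                 parts.append(cr.strip())
--
--     # Holdings - court determinations
--     for h in (graph.get("holdings") or []):
--         if isinstance(h, dict):
--             t = h.get("text")
--             if isinstance(t, str) and t.strip():
--                 parts.append(t.strip())
--             rs = h.get("reasoning_summary")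
--             if isinstance(rs, str) and rs.strip():
--                 parts.append(rs.strip())
--
--     # Concepts - interpretation and labels
--     for c in (graph.get("concepts") or []):
--         if isinstance(c, dict):
--             for fld in ("unlisted_label", "unlisted_description", "interpretation"):
--                 val = c.get(fld)
--                 if isinstance(val, str) and val.strip():
--                     parts.append(val.strip())
--
--     # Precedents - cited propositions
--     for p in (graph.get("precedents") or []):
--         if isinstance(p, dict):
--             prop = p.get("cited_proposition")
--             if isinstance(prop, str) and prop.strip():
--                 parts.append(prop.strip())
--
--     return " ".join(parts)
-- ===== SOURCE B (Python) =====
-- # Different decomposition: no parts list and no join -- the result string is built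
-- # directly by structural recursion (spec -> items -> fields) with a 'glue' combiner
-- # that inserts the separator only between two non-empty pieces.
-- _SPEC = [
--     ("facts", ["text"]),
--     ("issues", ["text"]),
--     ("arguments", ["claim", "court_reasoning"]),
--     ("holdings", ["text", "reasoning_summary"]),
--     ("concepts", ["unlisted_label", "unlisted_description", "interpretation"]),
--     ("precedents", ["cited_proposition"]),
-- ]
--
-- def _glue(a, b):
--     if not a:
--         return b
--     if not b:
--         return a
--     return a + " " + b
--
-- def _fields_text(item, fields):
--     if not fields:
--         return ""
--     v = item.get(fields[0])
--     head = v.strip() if isinstance(v, str) else ""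
--     return _glue(head, _fields_text(item, fields[1:]))
--
-- def _items_text(items, fields):
--     if not items:
--         return ""
--     head = _fields_text(items[0], fields) if isinstance(items[0], dict) else ""
--     return _glue(head, _items_text(items[1:], fields))
--
-- def _spec_text(graph, spec):
--     if not spec:
--         return ""
--     key, fields = spec[0]
--     return _glue(_items_text(graph.get(key) or [], fields), _spec_text(graph, spec[1:]))
--
-- def build_full_case_text(graph):
--     return _spec_text(graph, _SPEC)
-- ===== Notes on version B (the rewrite author's own statement) =====
-- stated objective: alternative
-- what changed: Instead of accumulating a parts list over six inline blocks and joining once, B builds the result string directly by structural recursion over a (key, fields) spec, items and fields, with a glue combiner that inserts the separator only between non-empty pieces; no intermediate list and no join.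
import Mathlib
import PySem

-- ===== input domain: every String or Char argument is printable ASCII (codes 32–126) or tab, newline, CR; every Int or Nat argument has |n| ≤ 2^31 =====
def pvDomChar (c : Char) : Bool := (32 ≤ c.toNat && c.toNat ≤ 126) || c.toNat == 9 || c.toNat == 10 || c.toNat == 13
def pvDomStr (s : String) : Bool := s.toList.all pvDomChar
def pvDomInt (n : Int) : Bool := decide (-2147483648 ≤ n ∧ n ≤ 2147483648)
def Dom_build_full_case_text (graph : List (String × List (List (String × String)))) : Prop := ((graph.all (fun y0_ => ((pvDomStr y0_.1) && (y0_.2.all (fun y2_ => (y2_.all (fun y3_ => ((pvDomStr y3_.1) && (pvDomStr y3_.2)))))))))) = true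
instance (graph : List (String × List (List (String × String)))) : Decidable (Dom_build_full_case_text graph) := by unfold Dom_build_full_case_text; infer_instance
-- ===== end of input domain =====

-- B builds the result string directly by structural recursion (spec -> items -> fields)
-- with a glue combiner, instead of A's six append-to-a-list blocks followed by one join.
-- ===== PORT A =====
-- first-match assoc lookup = Python dict .get on the convention's association list
def pvLookup (d : List (String × String)) (k : String) : Option String :=
  List.lookup k d

def pvLookupL (g : List (String × List (List (String × String)))) (k : String) :
    Option (List (List (String × String))) :=
  List.lookup k g

def build_full_case_text (graph : List (String × List (List (String × String)))) : String :=
  let parts : List String := []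
  -- Facts
  let parts := ((pvLookupL graph "facts").getD []).foldl (fun acc f =>
      match pvLookup f "text" with
      | some t => if PySem.Str.strip t ≠ "" then acc ++ [PySem.Str.strip t] else acc
      | none => acc) parts
  -- Issues
  let parts := ((pvLookupL graph "issues").getD []).foldl (fun acc iss =>
      match pvLookup iss "text" with
      | some t => if PySem.Str.strip t ≠ "" then acc ++ [PySem.Str.strip t] else acc
      | none => acc) parts
  -- Arguments
  let parts := ((pvLookupL graph "arguments").getD []).foldl (fun acc a =>
      let acc := match pvLookup a "claim" with
      | some t => if PySem.Str.strip t ≠ "" then acc ++ [PySem.Str.strip t] else acc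
      | none => acc
      match pvLookup a "court_reasoning" with
      | some cr => if PySem.Str.strip cr ≠ "" then acc ++ [PySem.Str.strip cr] else acc
      | none => acc) parts
  -- Holdings
  let parts := ((pvLookupL graph "holdings").getD []).foldl (fun acc h =>
      let acc := match pvLookup h "text" with
      | some t => if PySem.Str.strip t ≠ "" then acc ++ [PySem.Str.strip t] else acc
      | none => acc
      match pvLookup h "reasoning_summary" with
      | some rs => if PySem.Str.strip rs ≠ "" then acc ++ [PySem.Str.strip rs] else acc
      | none => acc) parts
  -- Concepts
  let parts := ((pvLookupL graph "concepts").getD []).foldl (fun acc c =>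
      ["unlisted_label", "unlisted_description", "interpretation"].foldl (fun acc2 fld =>
        match pvLookup c fld with
        | some v => if PySem.Str.strip v ≠ "" then acc2 ++ [PySem.Str.strip v] else acc2
        | none => acc2) acc) parts
  -- Precedents
  let parts := ((pvLookupL graph "precedents").getD []).foldl (fun acc p =>
      match pvLookup p "cited_proposition" with
      | some prop => if PySem.Str.strip prop ≠ "" then acc ++ [PySem.Str.strip prop] else acc
      | none => acc) parts
  PySem.Str.join " " parts

-- ===== PORT B =====
-- _glue: separator only between two non-empty pieces
def pvGlue (a b : String) : String :=
  if a = "" then b else if b = "" then a else a ++ " " ++ b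

def pvSpecTable : List (String × List String) :=
  [("facts", ["text"]),
   ("issues", ["text"]),
   ("arguments", ["claim", "court_reasoning"]),
   ("holdings", ["text", "reasoning_summary"]),
   ("concepts", ["unlisted_label", "unlisted_description", "interpretation"]),
   ("precedents", ["cited_proposition"])]

-- _fields_text (every value is a str under the type convention, so the isinstance branch is the 'some' case)
def pvFieldsText (item : List (String × String)) : List String → String
  | [] => ""
  | f :: fs =>
    let head := match pvLookup item f with
      | some v => PySem.Str.strip v
      | none => ""
    pvGlue head (pvFieldsText item fs)

-- _items_text (every item is a dict under the type convention)
def pvItemsText (fields : List String) : List (List (String × String)) → String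
  | [] => ""
  | it :: rest => pvGlue (pvFieldsText it fields) (pvItemsText fields rest)

-- _spec_text
def pvSpecText (graph : List (String × List (List (String × String)))) :
    List (String × List String) → String
  | [] => ""
  | kf :: rest =>
    pvGlue (pvItemsText kf.2 ((pvLookupL graph kf.1).getD [])) (pvSpecText graph rest)

def build_full_case_text_alt (graph : List (String × List (List (String × String)))) : String :=
  pvSpecText graph pvSpecTable

-- ===== PRECONDITION & SPEC =====
def Spec_build_full_case_text (graph : List (String × List (List (String × String)))) (out : String) : Prop := out = build_full_case_text_alt graph
instance (graph : List (String × List (List (String × String)))) (out : String) : Decidable (Spec_build_full_case_text graph out) := by unfold Spec_build_full_case_text; infer_instance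

-- ===== CLAIM (what is proved, stated in full; the proofs are below) =====
def Claim_equal_build_full_case_text : Prop := ∀ (graph : List (String × List (List (String × String)))), Dom_build_full_case_text graph → Spec_build_full_case_text graph (build_full_case_text graph)

-- ===== LEMMAS AND PROOFS =====
-- the per-field contribution of one item, as a list (empty or a singleton)
def pvCell (item : List (String × String)) (fld : String) : List String :=
  match pvLookup item fld with
  | some v => if PySem.Str.strip v ≠ "" then [PySem.Str.strip v] else []
  | none => []

theorem pvCell_append (acc : List String) (item : List (String × String)) (fld : String) :
    (match pvLookup item fld with
     | some v => if PySem.Str.strip v ≠ "" then acc ++ [PySem.Str.strip v] else acc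
     | none => acc) = acc ++ pvCell item fld := by
  unfold pvCell
  cases pvLookup item fld with
  | none => simp
  | some v => by_cases h : PySem.Str.strip v ≠ "" <;> simp [h]

theorem foldl_cell (l : List (List (String × String))) (fld : String) (acc : List String) :
    l.foldl (fun acc x =>
      match pvLookup x fld with
      | some v => if PySem.Str.strip v ≠ "" then acc ++ [PySem.Str.strip v] else acc
      | none => acc) acc
    = acc ++ l.flatMap (fun x => pvCell x fld) := by
  have h : (fun (acc : List String) (x : List (String × String)) =>
      match pvLookup x fld with
      | some v => if PySem.Str.strip v ≠ "" then acc ++ [PySem.Str.strip v] else acc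
      | none => acc) = (fun acc x => acc ++ pvCell x fld) := by
    funext acc x; exact pvCell_append acc x fld
  rw [h, PySem.List.foldl_append_eq_flatMap]

theorem foldl_cell2 (l : List (List (String × String))) (f1 f2 : String) (acc : List String) :
    l.foldl (fun acc x =>
      let acc := match pvLookup x f1 with
      | some v => if PySem.Str.strip v ≠ "" then acc ++ [PySem.Str.strip v] else acc
      | none => acc
      match pvLookup x f2 with
      | some v => if PySem.Str.strip v ≠ "" then acc ++ [PySem.Str.strip v] else acc
      | none => acc) acc
    = acc ++ l.flatMap (fun x => pvCell x f1 ++ pvCell x f2) := by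
  have h : (fun (acc : List String) (x : List (String × String)) =>
      let acc := match pvLookup x f1 with
      | some v => if PySem.Str.strip v ≠ "" then acc ++ [PySem.Str.strip v] else acc
      | none => acc
      match pvLookup x f2 with
      | some v => if PySem.Str.strip v ≠ "" then acc ++ [PySem.Str.strip v] else acc
      | none => acc) = (fun acc x => acc ++ (pvCell x f1 ++ pvCell x f2)) := by
    funext acc x
    simp only [pvCell_append]
    simp [List.append_assoc]
  rw [h, PySem.List.foldl_append_eq_flatMap]

theorem foldl_cell3 (l : List (List (String × String))) (f1 f2 f3 : String) (acc : List String) :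
    l.foldl (fun acc x =>
      [f1, f2, f3].foldl (fun acc2 fld =>
        match pvLookup x fld with
        | some v => if PySem.Str.strip v ≠ "" then acc2 ++ [PySem.Str.strip v] else acc2
        | none => acc2) acc) acc
    = acc ++ l.flatMap (fun x => pvCell x f1 ++ pvCell x f2 ++ pvCell x f3) := by
  have h : (fun (acc : List String) (x : List (String × String)) =>
      [f1, f2, f3].foldl (fun acc2 fld =>
        match pvLookup x fld with
        | some v => if PySem.Str.strip v ≠ "" then acc2 ++ [PySem.Str.strip v] else acc2
        | none => acc2) acc) = (fun acc x => acc ++ (pvCell x f1 ++ pvCell x f2 ++ pvCell x f3)) := by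
    funext acc x
    simp only [List.foldl_cons, List.foldl_nil, pvCell_append]
    simp [List.append_assoc]
  rw [h, PySem.List.foldl_append_eq_flatMap]

-- ---- String/Chars facts about join " " and pvGlue ----
theorem pvNe_empty_iff (s : String) : s ≠ "" ↔ s.toList ≠ [] := by
  constructor
  · intro h hl; exact h (String.toList_inj.mp (by rw [hl]; rfl))
  · intro h he; exact h (by rw [he]; rfl)

theorem pvStrJoin_nil : PySem.Str.join " " [] = "" := by
  apply String.toList_inj.mp
  simp [PySem.Str.toList_join, PySem.Chars.join_nil]

theorem pvStrJoin_singleton (s : String) : PySem.Str.join " " [s] = s := by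
  apply String.toList_inj.mp
  simp [PySem.Str.toList_join, PySem.Chars.join_singleton]

theorem pvCharsJoin_ne_nil (sep x : List Char) (xs : List (List Char)) (hx : x ≠ []) :
    PySem.Chars.join sep (x :: xs) ≠ [] := by
  cases xs with
  | nil => simpa [PySem.Chars.join_singleton] using hx
  | cons y ys =>
    rw [PySem.Chars.join_cons_cons]
    simp [hx]

theorem pvCharsJoin_append_cons (sep : List Char) (x : List Char) (xs : List (List Char))
    (l2 : List (List Char)) (h2 : l2 ≠ []) :
    PySem.Chars.join sep ((x :: xs) ++ l2) =
      PySem.Chars.join sep (x :: xs) ++ sep ++ PySem.Chars.join sep l2 := by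
  induction xs generalizing x with
  | nil =>
    cases l2 with
    | nil => exact absurd rfl h2
    | cons y ys =>
      simp [PySem.Chars.join_singleton, PySem.Chars.join_cons_cons]
  | cons x2 r ih =>
    have e1 : (x :: x2 :: r) ++ l2 = x :: ((x2 :: r) ++ l2) := rfl
    have e2 : (x2 :: r) ++ l2 = x2 :: (r ++ l2) := rfl
    rw [e1, e2, PySem.Chars.join_cons_cons, ← e2, ih x2, PySem.Chars.join_cons_cons]
    simp [List.append_assoc]

theorem pvCharsJoin_append (sep : List Char) (l1 l2 : List (List Char))
    (h1 : l1 ≠ []) (h2 : l2 ≠ []) :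
    PySem.Chars.join sep (l1 ++ l2) =
      PySem.Chars.join sep l1 ++ sep ++ PySem.Chars.join sep l2 := by
  cases l1 with
  | nil => exact absurd rfl h1
  | cons x xs => exact pvCharsJoin_append_cons sep x xs l2 h2

theorem pvStrJoin_ne_empty (x : String) (xs : List String) (hx : x ≠ "") :
    PySem.Str.join " " (x :: xs) ≠ "" := by
  rw [pvNe_empty_iff]
  rw [PySem.Str.toList_join]
  exact pvCharsJoin_ne_nil _ _ _ ((pvNe_empty_iff x).mp hx)

theorem pvGlue_join (l1 l2 : List String)
    (h1 : ∀ s ∈ l1, s ≠ "") (h2 : ∀ s ∈ l2, s ≠ "") :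
    pvGlue (PySem.Str.join " " l1) (PySem.Str.join " " l2) =
      PySem.Str.join " " (l1 ++ l2) := by
  cases l1 with
  | nil => simp [pvStrJoin_nil, pvGlue]
  | cons x xs =>
    cases l2 with
    | nil =>
      unfold pvGlue
      by_cases h : PySem.Str.join " " (x :: xs) = "" <;>
        simp [h, pvStrJoin_nil]
    | cons y ys =>
      have ha := pvStrJoin_ne_empty x xs (h1 x (by simp))
      have hb := pvStrJoin_ne_empty y ys (h2 y (by simp))
      unfold pvGlue
      rw [if_neg ha, if_neg hb]
      apply String.toList_inj.mp
      simp only [String.toList_append, PySem.Str.toList_join, List.map_append]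
      rw [pvCharsJoin_append " ".toList _ _ (by simp) (by simp)]

theorem pvMem_pvCell_ne (item : List (String × String)) (fld s : String)
    (h : s ∈ pvCell item fld) : s ≠ "" := by
  unfold pvCell at h
  cases hl : pvLookup item fld with
  | none => rw [hl] at h; simp at h
  | some v =>
    rw [hl] at h
    by_cases hv : PySem.Str.strip v = ""
    · simp [hv] at h
    · simp [hv] at h; exact h ▸ hv

theorem pvFieldsText_eq (item : List (String × String)) (fs : List String) :
    pvFieldsText item fs = PySem.Str.join " " (fs.flatMap (pvCell item)) := by
  induction fs with
  | nil => simp [pvFieldsText, pvStrJoin_nil]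
  | cons f fs ih =>
    have hhead : (match pvLookup item f with
        | some v => PySem.Str.strip v
        | none => "") = PySem.Str.join " " (pvCell item f) := by
      unfold pvCell
      cases pvLookup item f with
      | none => simp [pvStrJoin_nil]
      | some v =>
        by_cases hv : PySem.Str.strip v ≠ ""
        · simp [hv, pvStrJoin_singleton]
        · simp only [ne_eq, not_not] at hv
          simp [hv, pvStrJoin_nil]
    show pvGlue _ _ = _
    rw [hhead, ih, pvGlue_join]
    · simp
    · exact fun s hs => pvMem_pvCell_ne item f s hs
    · intro s hs
      rcases List.mem_flatMap.mp hs with ⟨g, _, hg⟩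
      exact pvMem_pvCell_ne item g s hg

theorem pvItemsText_eq (fields : List String) (items : List (List (String × String))) :
    pvItemsText fields items =
      PySem.Str.join " " (items.flatMap (fun it => fields.flatMap (pvCell it))) := by
  induction items with
  | nil => simp [pvItemsText, pvStrJoin_nil]
  | cons it rest ih =>
    show pvGlue _ _ = _
    rw [pvFieldsText_eq, ih, pvGlue_join]
    · simp
    · intro s hs
      rcases List.mem_flatMap.mp hs with ⟨g, _, hg⟩
      exact pvMem_pvCell_ne it g s hg
    · intro s hs
      rcases List.mem_flatMap.mp hs with ⟨i, _, hi⟩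
      rcases List.mem_flatMap.mp hi with ⟨g, _, hg⟩
      exact pvMem_pvCell_ne i g s hg

theorem pvSpecText_eq (graph : List (String × List (List (String × String))))
    (spec : List (String × List String)) :
    pvSpecText graph spec =
      PySem.Str.join " " (spec.flatMap (fun kf =>
        ((pvLookupL graph kf.1).getD []).flatMap (fun it => kf.2.flatMap (pvCell it)))) := by
  induction spec with
  | nil => simp [pvSpecText, pvStrJoin_nil]
  | cons kf rest ih =>
    show pvGlue _ _ = _
    rw [pvItemsText_eq, ih, pvGlue_join]
    · simp
    · intro s hs
      rcases List.mem_flatMap.mp hs with ⟨i, _, hi⟩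
      rcases List.mem_flatMap.mp hi with ⟨g, _, hg⟩
      exact pvMem_pvCell_ne i g s hg
    · intro s hs
      rcases List.mem_flatMap.mp hs with ⟨k, _, hk⟩
      rcases List.mem_flatMap.mp hk with ⟨i, _, hi⟩
      rcases List.mem_flatMap.mp hi with ⟨g, _, hg⟩
      exact pvMem_pvCell_ne i g s hg

-- ===== VERDICT (by name: the statement is the Claim_ definition above) =====
theorem build_full_case_text_spec : Claim_equal_build_full_case_text := by
  intro graph _
  unfold Spec_build_full_case_text build_full_case_text build_full_case_text_alt
  rw [pvSpecText_eq]
  unfold pvSpecTable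
  simp only [foldl_cell, foldl_cell2, foldl_cell3, List.flatMap_cons, List.flatMap_nil,
    List.nil_append, List.append_assoc, List.append_nil]
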